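-- pv_equiv track=rewrite | github.com/petercheng00/adventOfCode | day15/day15_pt2.py | getVisitedCoords
-- ===== SOURCE A (Python) =====
-- def getVisitedCoords(inputs):
--     vc = [(0,0)]
--     for i in inputs:
--         x, y = vc[-1] # y is north
--         if i == 1: # north
--             vc.append((x, y+1))
--         elif i == 2: # south
--             vc.append((x, y-1))
--         elif i == 3: # west
--             vc.append((x-1, y))
--         elif i == 4: # east
--             vc.append((x+1, y))
--     return vc
-- ===== SOURCE B (Python) =====
-- def _prefix(nums):
--     total = 0
--     out = [0]
--     for n in nums:
--         total += n
--         out.append(total)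
--     return out
--
-- def getVisitedCoords(inputs):
--     deltas = {1: (0, 1), 2: (0, -1), 3: (-1, 0), 4: (1, 0)}
--     steps = [deltas[i] for i in inputs if i in deltas]
--     return list(zip(_prefix([s[0] for s in steps]),
--                     _prefix([s[1] for s in steps])))
-- ===== Notes on version B (the rewrite author's own statement) =====
-- stated objective: alternative
-- what changed: Replaces the incremental last-element if/elif loop by a delta-map filter/map into step vectors followed by two independent prefix sums (x and y) zipped into coordinates.
import Mathlib
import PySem

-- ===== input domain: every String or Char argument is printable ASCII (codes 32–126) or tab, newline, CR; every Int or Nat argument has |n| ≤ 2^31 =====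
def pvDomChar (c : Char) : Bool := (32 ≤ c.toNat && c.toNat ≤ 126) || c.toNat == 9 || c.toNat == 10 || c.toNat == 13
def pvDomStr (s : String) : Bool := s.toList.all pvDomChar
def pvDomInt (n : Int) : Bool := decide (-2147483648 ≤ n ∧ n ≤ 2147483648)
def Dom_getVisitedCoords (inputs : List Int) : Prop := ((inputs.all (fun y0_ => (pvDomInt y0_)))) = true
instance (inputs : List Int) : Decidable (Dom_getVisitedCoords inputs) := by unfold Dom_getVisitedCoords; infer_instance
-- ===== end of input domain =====

-- B recomputes the path as filtered step vectors followed by two independent prefix sums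
-- zipped into coordinates (alternative decomposition; same behaviour, return value only).

-- ===== PORT A =====
-- literal port of A: fold over inputs keeping the visited list vc, reading vc[-1] each step
def getVisitedCoords (inputs : List Int) : List (Int × Int) :=
  inputs.foldl (fun (vc : List (Int × Int)) (i : Int) =>
    match PySem.List.pyGet? vc (-1) with
    | none => vc  -- unreachable: vc starts at [(0,0)] and never shrinks
    | some (x, y) =>
      if i = 1 then vc ++ [(x, y + 1)]
      else if i = 2 then vc ++ [(x, y - 1)]
      else if i = 3 then vc ++ [(x - 1, y)]
      else if i = 4 then vc ++ [(x + 1, y)]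
      else vc) [((0 : Int), (0 : Int))]

-- ===== PORT B =====
-- running-total prefix sums with leading 0 (port of Source B's _prefix)
def pvPrefix (nums : List Int) : List Int :=
  (nums.foldl (fun (st : Int × List Int) n => (st.1 + n, st.2 ++ [st.1 + n])) (0, [0])).2

-- the delta dict of Source B
def pvDeltas : PySem.Dict Int (Int × Int) :=
  PySem.Dict.ofList [(1, (0, 1)), (2, (0, -1)), (3, (-1, 0)), (4, (1, 0))]

def getVisitedCoords_alt (inputs : List Int) : List (Int × Int) :=
  let steps := inputs.filterMap (fun i => PySem.Dict.get? pvDeltas i)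
  (pvPrefix (steps.map Prod.fst)).zip (pvPrefix (steps.map Prod.snd))

-- ===== PRECONDITION & SPEC =====
def Spec_getVisitedCoords (inputs : List Int) (out : List (Int × Int)) : Prop := out = getVisitedCoords_alt inputs
instance (inputs : List Int) (out : List (Int × Int)) : Decidable (Spec_getVisitedCoords inputs out) := by unfold Spec_getVisitedCoords; infer_instance

-- ===== CLAIM (what is proved, stated in full; the proofs are below) =====
def Claim_equal_getVisitedCoords : Prop := ∀ (inputs : List Int), Dom_getVisitedCoords inputs → Spec_getVisitedCoords inputs (getVisitedCoords inputs)

-- ===== LEMMAS AND PROOFS =====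

-- the common characterisation: positions after p along a list of deltas
def pvPath (p : Int × Int) : List (Int × Int) → List (Int × Int)
  | [] => []
  | d :: ds => (p.1 + d.1, p.2 + d.2) :: pvPath (p.1 + d.1, p.2 + d.2) ds

-- per-coordinate running totals (tail of pvPrefix)
def pvTail (t : Int) : List Int → List Int
  | [] => []
  | n :: ns => (t + n) :: pvTail (t + n) ns

theorem pvPrefix_aux (nums : List Int) (t : Int) (out : List Int) :
    (nums.foldl (fun (st : Int × List Int) n => (st.1 + n, st.2 ++ [st.1 + n])) (t, out)).2
      = out ++ pvTail t nums := by
  induction nums generalizing t out with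
  | nil => simp [pvTail]
  | cons n ns ih => simp [List.foldl, pvTail, ih, List.append_assoc]

theorem pvZip_tail (ds : List (Int × Int)) (x y : Int) :
    (pvTail x (ds.map Prod.fst)).zip (pvTail y (ds.map Prod.snd)) = pvPath (x, y) ds := by
  induction ds generalizing x y with
  | nil => simp [pvTail, pvPath]
  | cons d ds ih =>
    obtain ⟨dx, dy⟩ := d
    simpa [pvTail, pvPath, List.zip] using ih (x + dx) (y + dy)

theorem altEq (inputs : List Int) :
    getVisitedCoords_alt inputs
      = (0, 0) :: pvPath (0, 0) (inputs.filterMap (fun i => PySem.Dict.get? pvDeltas i)) := by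
  unfold getVisitedCoords_alt pvPrefix
  simp only [pvPrefix_aux]
  simpa using pvZip_tail (inputs.filterMap (fun i => PySem.Dict.get? pvDeltas i)) 0 0

theorem deltas_items : pvDeltas.items = [(1, (0, 1)), (2, (0, -1)), (3, (-1, 0)), (4, (1, 0))] := by
  decide

theorem deltas_get_other (i : Int) (h1 : ¬ i = 1) (h2 : ¬ i = 2) (h3 : ¬ i = 3) (h4 : ¬ i = 4) :
    PySem.Dict.get? pvDeltas i = none := by
  have e1 : ((1 : Int) == i) = false := by simpa using Ne.symm h1
  have e2 : ((2 : Int) == i) = false := by simpa using Ne.symm h2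
  have e3 : ((3 : Int) == i) = false := by simpa using Ne.symm h3
  have e4 : ((4 : Int) == i) = false := by simpa using Ne.symm h4
  simp [PySem.Dict.get?, deltas_items, List.find?, e1, e2, e3, e4]

theorem foldA_aux (inputs : List Int) (front : List (Int × Int)) (p : Int × Int) :
    inputs.foldl (fun (vc : List (Int × Int)) (i : Int) =>
      match PySem.List.pyGet? vc (-1) with
      | none => vc
      | some (x, y) =>
        if i = 1 then vc ++ [(x, y + 1)]
        else if i = 2 then vc ++ [(x, y - 1)]
        else if i = 3 then vc ++ [(x - 1, y)]
        else if i = 4 then vc ++ [(x + 1, y)]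
        else vc) (front ++ [p] : List (Int × Int))
      = front ++ [p] ++ pvPath p (inputs.filterMap (fun i => PySem.Dict.get? pvDeltas i)) := by
  induction inputs generalizing front p with
  | nil => simp [pvPath]
  | cons i rest ih =>
    simp only [List.foldl, PySem.List.pyGet?_neg_one_append_singleton]
    by_cases h1 : i = 1
    · subst h1
      simpa [PySem.Dict.get?, deltas_items, List.find?, pvPath, List.append_assoc] using
        ih (front ++ [p]) (p.1, p.2 + 1)
    · by_cases h2 : i = 2
      · subst h2
        simpa [PySem.Dict.get?, deltas_items, List.find?, pvPath, List.append_assoc] using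
          ih (front ++ [p]) (p.1, p.2 - 1)
      · by_cases h3 : i = 3
        · subst h3
          simpa [PySem.Dict.get?, deltas_items, List.find?, pvPath, List.append_assoc] using
            ih (front ++ [p]) (p.1 - 1, p.2)
        · by_cases h4 : i = 4
          · subst h4
            simpa [PySem.Dict.get?, deltas_items, List.find?, pvPath, List.append_assoc] using
              ih (front ++ [p]) (p.1 + 1, p.2)
          · simpa [h1, h2, h3, h4, deltas_get_other i h1 h2 h3 h4] using ih front p

-- ===== VERDICT (by name: the statement is the Claim_ definition above) =====
theorem getVisitedCoords_spec : Claim_equal_getVisitedCoords := by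
  intro inputs _
  unfold Spec_getVisitedCoords getVisitedCoords
  rw [altEq]
  simpa using foldA_aux inputs [] (0, 0)
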